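-- pv_equiv track=rewrite | github.com/Veanir/imo-4 | python_reference.py | has_edge
-- ===== SOURCE A (Python) =====
-- def has_edge(cycle, a, b):
--     for i in range(len(cycle) - 1):
--         x, y = cycle[i], cycle[i + 1]
--         if (a, b) == (x, y):
--             return +1
--         if (a, b) == (y, x):
--             return -1
--
--     x, y = cycle[-1], cycle[0]
--     if (a, b) == (x, y):
--         return +1
--     if (a, b) == (y, x):
--         return -1
--     return 0
-- ===== SOURCE B (Python) =====
-- def has_edge(cycle, a, b):
--     # Pair each vertex with its cyclic successor, locate the first forward and
--     # the first reverse occurrence of the edge, and decide the sign by comparing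
--     # the two positions (forward wins a tie at the same edge index).
--     pairs = list(zip(cycle, cycle[1:] + [cycle[0]]))
--     n = len(pairs)
--     fwd = next((i for i, p in enumerate(pairs) if p == (a, b)), n)
--     rev = next((i for i, p in enumerate(pairs) if p == (b, a)), n)
--     if fwd <= rev:
--         return 1 if fwd < n else 0
--     return -1
-- ===== Notes on version B (the rewrite author's own statement) =====
-- stated objective: alternative
-- what changed: A scans the edges with early return at the first match; B zips the cycle with its rotation, computes the index of the first forward occurrence and the index of the first reverse occurrence of the edge as two staged searches, and derives the sign by comparing those two indices.
import Mathlib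
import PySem

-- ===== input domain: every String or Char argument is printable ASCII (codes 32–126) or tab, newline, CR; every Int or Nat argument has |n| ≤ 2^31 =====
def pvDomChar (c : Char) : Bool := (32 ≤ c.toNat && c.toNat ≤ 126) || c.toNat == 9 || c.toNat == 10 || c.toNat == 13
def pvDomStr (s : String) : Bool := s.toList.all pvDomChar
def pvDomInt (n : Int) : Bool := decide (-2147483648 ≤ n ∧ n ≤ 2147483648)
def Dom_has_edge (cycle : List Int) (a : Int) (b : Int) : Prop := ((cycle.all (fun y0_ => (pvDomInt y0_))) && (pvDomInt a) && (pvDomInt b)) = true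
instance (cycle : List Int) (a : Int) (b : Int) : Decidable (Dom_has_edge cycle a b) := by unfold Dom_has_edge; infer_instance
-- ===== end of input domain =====

-- B replaces A's early-return scan by two staged first-index searches over the
-- rotation-zipped edge list and decides the sign by comparing the two indices.

-- ===== PORT A =====
-- the 'for i in range(len(cycle) - 1)' loop with its two early returns
def hasEdgeLoop (cycle : List Int) (a : Int) (b : Int) : List Int → Option Int
  | [] => none
  | i :: rest =>
    match PySem.List.pyGet? cycle i, PySem.List.pyGet? cycle (i + 1) with
    | some x, some y =>
      if (a, b) = (x, y) then some 1
      else if (a, b) = (y, x) then some (-1)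
      else hasEdgeLoop cycle a b rest
    | _, _ => none  -- IndexError (unreachable: the loop indices are in range)

def has_edge (cycle : List Int) (a : Int) (b : Int) : Int :=
  match hasEdgeLoop cycle a b (PySem.List.pyRange 0 ((cycle.length : Int) - 1) 1) with
  | some r => r
  | none =>
    match PySem.List.pyGet? cycle (-1), PySem.List.pyGet? cycle 0 with
    | some x, some y =>
      if (a, b) = (x, y) then 1
      else if (a, b) = (y, x) then -1
      else 0
    | _, _ => 0  -- IndexError on the empty cycle; excluded by Pre_has_edge

-- ===== PORT B =====
def has_edge_alt (cycle : List Int) (a : Int) (b : Int) : Int :=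
  match PySem.List.pyGet? cycle 0 with
  | none => 0  -- IndexError on the empty cycle (cycle[0]); excluded by Pre_has_edge
  | some c0 =>
    let pairs := cycle.zip (PySem.List.slice cycle (some 1) none ++ [c0])
    let n := pairs.length
    -- next((i for i, p in enumerate(pairs) if p == (a, b)), n)  =  findIdx (length if absent)
    let fwd := pairs.findIdx (fun p => decide (p = (a, b)))
    let rev := pairs.findIdx (fun p => decide (p = (b, a)))
    if fwd ≤ rev then (if fwd < n then 1 else 0) else -1

-- ===== PRECONDITION & SPEC =====
-- Pre_ excludes only the empty cycle, on which A raises IndexError (cycle[-1]).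
def Pre_has_edge (cycle : List Int) (a : Int) (b : Int) : Prop := cycle ≠ []
instance (cycle : List Int) (a : Int) (b : Int) : Decidable (Pre_has_edge cycle a b) := by
  unfold Pre_has_edge; infer_instance
def pvWitness_has_edge : List Int × Int × Int := ([1, 2, 3], 1, 2)

def Spec_has_edge (cycle : List Int) (a : Int) (b : Int) (out : Int) : Prop := out = has_edge_alt cycle a b
instance (cycle : List Int) (a : Int) (b : Int) (out : Int) : Decidable (Spec_has_edge cycle a b out) := by unfold Spec_has_edge; infer_instance

-- ===== CLAIM (what is proved, stated in full; the proofs are below) =====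
def Claim_equal_has_edge : Prop := ∀ (cycle : List Int) (a : Int) (b : Int), Dom_has_edge cycle a b → Pre_has_edge cycle a b → Spec_has_edge cycle a b (has_edge cycle a b)

-- ===== LEMMAS AND PROOFS =====

-- first-match orientation of an edge list: the common characterisation
def findEdge (a b : Int) : List (Int × Int) → Int
  | [] => 0
  | (x, y) :: rest =>
    if (a, b) = (x, y) then 1 else if (a, b) = (y, x) then -1 else findEdge a b rest

-- Option-valued form for A's loop (none = the loop fell through)
def findEdgeOpt (a b : Int) : List (Int × Int) → Option Int
  | [] => none
  | (x, y) :: rest =>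
    if (a, b) = (x, y) then some 1 else if (a, b) = (y, x) then some (-1)
    else findEdgeOpt a b rest

-- A's index loop is the first-match scan over the consecutive pairs
lemma loop_eq_findEdgeOpt (cycle : List Int) (a b : Int) (n : Nat) :
    ∀ j : Nat, cycle.length - 1 - j = n →
      hasEdgeLoop cycle a b (PySem.List.pyRange (j : Int) ((cycle.length : Int) - 1) 1)
        = findEdgeOpt a b ((cycle.drop j).zip (cycle.drop (j + 1))) := by
  induction n with
  | zero =>
    intro j hj
    rw [PySem.List.pyRange_one_eq_nil (by omega)]
    rw [List.drop_eq_nil_of_le (by omega : cycle.length ≤ j + 1)]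
    simp [hasEdgeLoop, findEdgeOpt]
  | succ n ih =>
    intro j hj
    have hlt : j + 1 < cycle.length := by omega
    rw [PySem.List.pyRange_one_cons (by omega)]
    have h1 : PySem.List.pyGet? cycle (j : Int) = some cycle[j] := by
      rw [PySem.List.pyGet?_natCast]; exact List.getElem?_eq_getElem (by omega)
    have h2 : PySem.List.pyGet? cycle ((j : Int) + 1) = some cycle[j + 1] := by
      have hcast : (j : Int) + 1 = ((j + 1 : Nat) : Int) := by push_cast; ring
      rw [hcast, PySem.List.pyGet?_natCast]; exact List.getElem?_eq_getElem hlt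
    have hd1 : cycle.drop j = cycle[j] :: cycle.drop (j + 1) := by
      rw [List.getElem_cons_drop]
    have hd2 : cycle.drop (j + 1) = cycle[j + 1] :: cycle.drop (j + 2) := by
      rw [List.getElem_cons_drop]
    have hz : (cycle.drop j).zip (cycle.drop (j + 1))
        = (cycle[j], cycle[j + 1]) :: ((cycle.drop (j + 1)).zip (cycle.drop (j + 2))) := by
      rw [hd1, hd2, List.zip_cons_cons, ← hd2]
    have hcast : (j : Int) + 1 = ((j + 1 : Nat) : Int) := by push_cast; ring
    rw [hasEdgeLoop, h1, h2, hz, hcast, ih (j + 1) (by omega)]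
    simp only [findEdgeOpt, show j + 1 + 1 = j + 2 from rfl]

-- zipping a nonempty list against its rotation appends the wraparound edge
lemma zip_wrap (l : List Int) (h z : Int) :
    (h :: l).zip (l ++ [z]) = (h :: l).zip l ++ [((h :: l).getLast (by simp), z)] := by
  induction l generalizing h with
  | nil => simp
  | cons y t ih =>
    simp only [List.cons_append, List.zip_cons_cons, ih y]
    rfl

lemma findEdge_append_singleton (a b x y : Int) (es : List (Int × Int)) :
    findEdge a b (es ++ [(x, y)])
      = match findEdgeOpt a b es with
        | some r => r
        | none => if (a, b) = (x, y) then 1 else if (a, b) = (y, x) then -1 else 0 := by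
  induction es with
  | nil => simp [findEdge, findEdgeOpt]
  | cons e rest ih =>
    obtain ⟨u, v⟩ := e
    simp only [List.cons_append, findEdge, findEdgeOpt, ih]
    split_ifs <;> rfl

-- the two-index comparison computes the first-match orientation
lemma findEdge_eq_idx_cmp (a b : Int) (es : List (Int × Int)) :
    findEdge a b es
      = (if es.findIdx (fun p => decide (p = (a, b))) ≤ es.findIdx (fun p => decide (p = (b, a)))
         then (if es.findIdx (fun p => decide (p = (a, b))) < es.length then (1 : Int) else 0)
         else -1) := by
  induction es with
  | nil => simp [findEdge]
  | cons e rest ih =>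
    obtain ⟨x, y⟩ := e
    by_cases hf : (a, b) = (x, y)
    · simp [findEdge, hf, List.findIdx_cons]
    · by_cases hr : (b, a) = (x, y)
      · have hba : (a, b) = (y, x) :=
          Prod.ext_iff.mpr ⟨(Prod.ext_iff.mp hr).2, (Prod.ext_iff.mp hr).1⟩
        have hd1 : decide ((x, y) = (a, b)) = false := by
          simp only [decide_eq_false_iff_not]; exact fun h => hf h.symm
        have hd2 : decide ((x, y) = (b, a)) = true := by
          simp only [decide_eq_true_eq]; exact hr.symm
        rw [List.findIdx_cons, List.findIdx_cons]
        simp only [hd1, hd2, cond_false, cond_true]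
        have hyx : ¬ ((y, x) : Int × Int) = (x, y) := fun h => hf (hba.trans h)
        simp only [findEdge, hba, if_true]
        rw [if_neg hyx]
        exact (if_neg (by omega)).symm
      · have hyx : ¬ ((a, b) = (y, x)) := by
          intro h; exact hr (by simp_all [Prod.ext_iff])
        simp only [findEdge, hf, hyx, if_false, List.findIdx_cons]
        simp only [show ¬ ((x, y) = (a, b)) from fun h => hf h.symm,
          show ¬ ((x, y) = (b, a)) from fun h => hr h.symm, decide_false, cond_false]
        rw [ih]
        simp only [List.length_cons]
        split_ifs <;> first | rfl | omega

-- ===== VERDICT (by name: the statement is the Claim_ definition above) =====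
theorem has_edge_spec : Claim_equal_has_edge := by
  intro cycle a b _ hne
  obtain ⟨h, t, rfl⟩ : ∃ h t, cycle = h :: t := by
    cases cycle with | nil => exact absurd rfl hne | cons h t => exact ⟨h, t, rfl⟩
  unfold Spec_has_edge
  have hB : has_edge_alt (h :: t) a b = findEdge a b ((h :: t).zip (t ++ [h])) := by
    unfold has_edge_alt
    rw [PySem.List.pyGet?_zero_cons]
    simp only [PySem.List.slice_from_one]
    exact (findEdge_eq_idx_cmp a b _).symm
  rw [hB, zip_wrap, findEdge_append_singleton]
  show (match hasEdgeLoop (h :: t) a b (PySem.List.pyRange 0 (((h :: t).length : Int) - 1) 1) with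
    | some r => r
    | none =>
      match PySem.List.pyGet? (h :: t) (-1), PySem.List.pyGet? (h :: t) 0 with
      | some x, some y =>
        if (a, b) = (x, y) then 1 else if (a, b) = (y, x) then -1 else 0
      | _, _ => 0) = _
  have hloop := loop_eq_findEdgeOpt (h :: t) a b ((h :: t).length - 1) 0 (by omega)
  rw [Nat.cast_zero] at hloop
  have hg : (h :: t).getLast? = some ((h :: t).getLast (by simp)) :=
    List.getLast?_eq_some_getLast (by simp)
  simp only [Nat.zero_add, List.drop_zero, List.drop_one, List.tail_cons] at hloop
  rw [hloop, PySem.List.pyGet?_neg_one, hg, PySem.List.pyGet?_zero_cons]
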